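-- pv_equiv track=rewrite | github.com/ni1o1/emailmanager | processors/email_processor.py | group_emails_by_category
-- ===== SOURCE A (Python) =====
-- from typing import Dict, List, Tuple
--
-- def group_emails_by_category(emails: List[Dict]) -> Dict[str, List[Dict]]:
--     """
--     按 Stage 1 分类结果对邮件进行分组
--
--     Args:
--         emails: 已经过 Stage 1 分类的邮件列表
--
--     Returns:
--         分类字典，键为分类名，值为邮件列表
--     """
--     groups = {
--         "TRASH": [],
--         "PAPER": [],
--         "REVIEW": [],
--         "BILLING": [],
--         "NOTICE": [],
--         "EXAM": [],
--         "PERSONAL": [],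
--         "UNKNOWN": [],
--     }
--
--     for email in emails:
--         category = email.get("_stage1_category", "UNKNOWN")
--         if category in groups:
--             groups[category].append(email)
--         else:
--             groups["UNKNOWN"].append(email)
--
--     return groups
-- ===== SOURCE B (Python) =====
-- from typing import Dict, List, Tuple
--
-- _CATS = ["TRASH", "PAPER", "REVIEW", "BILLING", "NOTICE", "EXAM", "PERSONAL"]
--
-- def group_emails_by_category(emails: List[Dict]) -> Dict[str, List[Dict]]:
--     result = {c: [e for e in emails if e.get("_stage1_category", "UNKNOWN") == c]
--               for c in _CATS}
--     result["UNKNOWN"] = [e for e in emails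
--                          if e.get("_stage1_category", "UNKNOWN") not in _CATS]
--     return result
-- ===== Notes on version B (the rewrite author's own statement) =====
-- stated objective: alternative
-- what changed: Replaces A's single routing pass that mutates dict buckets with per-category comprehensions: one filter pass per fixed bucket, the UNKNOWN bucket collecting everything whose category is not among the seven concrete names.
import Mathlib
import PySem

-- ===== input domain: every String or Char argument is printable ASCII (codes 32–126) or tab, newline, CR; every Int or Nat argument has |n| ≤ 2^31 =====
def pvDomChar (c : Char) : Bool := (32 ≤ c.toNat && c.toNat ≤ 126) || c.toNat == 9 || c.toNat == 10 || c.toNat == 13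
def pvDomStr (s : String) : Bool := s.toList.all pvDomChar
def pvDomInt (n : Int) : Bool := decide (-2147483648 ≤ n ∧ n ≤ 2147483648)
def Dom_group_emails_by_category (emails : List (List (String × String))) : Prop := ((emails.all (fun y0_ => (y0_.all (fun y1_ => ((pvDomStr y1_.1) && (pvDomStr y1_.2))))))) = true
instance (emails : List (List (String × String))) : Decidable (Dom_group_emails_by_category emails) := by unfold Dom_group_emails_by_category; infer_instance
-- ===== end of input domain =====

-- B builds each bucket independently with one filter per fixed category name instead of A's single
-- mutating routing pass; same results, different decomposition (objective: alternative).

-- ===== PORT A =====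
-- email.get("_stage1_category", "UNKNOWN") on the email dict
def pvGetCatA (e : List (String × String)) : String :=
  (PySem.Dict.mk e).getD "_stage1_category" "UNKNOWN"

def pvStepA (groups : PySem.Dict String (List (List (String × String)))) (email : List (String × String)) : PySem.Dict String (List (List (String × String))) :=
  let category := pvGetCatA email
  if groups.contains category then
    groups.modify category [] (fun l => l ++ [email])
  else
    groups.modify "UNKNOWN" [] (fun l => l ++ [email])

def group_emails_by_category (emails : List (List (String × String))) : List (String × List (List (String × String))) :=
  let groups : PySem.Dict String (List (List (String × String))) :=
    PySem.Dict.mk [("TRASH", []), ("PAPER", []), ("REVIEW", []), ("BILLING", []),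
                   ("NOTICE", []), ("EXAM", []), ("PERSONAL", []), ("UNKNOWN", [])]
  let groups := emails.foldl pvStepA groups
  groups.items

-- ===== PORT B =====
def pvCats7 : List String := ["TRASH", "PAPER", "REVIEW", "BILLING", "NOTICE", "EXAM", "PERSONAL"]

-- B's lookup of the category: first matching key, default "UNKNOWN"
def pvGetCatB (e : List (String × String)) : String :=
  ((e.find? (fun p => p.1 == "_stage1_category")).map (·.2)).getD "UNKNOWN"

def group_emails_by_category_alt (emails : List (List (String × String))) : List (String × List (List (String × String))) :=
  (pvCats7.map (fun c => (c, emails.filter (fun e => pvGetCatB e == c)))) ++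
  [("UNKNOWN", emails.filter (fun e => !(pvCats7.contains (pvGetCatB e))))]

-- ===== PRECONDITION & SPEC =====
def Spec_group_emails_by_category (emails : List (List (String × String))) (out : List (String × List (List (String × String)))) : Prop := out = group_emails_by_category_alt emails
instance (emails : List (List (String × String))) (out : List (String × List (List (String × String)))) : Decidable (Spec_group_emails_by_category emails out) := by unfold Spec_group_emails_by_category; infer_instance

-- ===== CLAIM (what is proved, stated in full; the proofs are below) =====
def Claim_equal_group_emails_by_category : Prop := ∀ (emails : List (List (String × String))), Dom_group_emails_by_category emails → Spec_group_emails_by_category emails (group_emails_by_category emails)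

-- ===== LEMMAS AND PROOFS =====

theorem pvGetCat_eq (e : List (String × String)) : pvGetCatA e = pvGetCatB e := by
  induction e with
  | nil => rfl
  | cons p rest ih =>
    obtain ⟨k, v⟩ := p
    simp only [pvGetCatA, pvGetCatB] at *
    rw [PySem.Dict.getD_eq_get?_getD, PySem.Dict.get?_mk_cons]
    by_cases h : k == "_stage1_category" <;>
      simp [h, List.find?_cons, ← PySem.Dict.getD_eq_get?_getD, ih]

theorem stepA_eq (e : List (String × String))
    (t p r b n ex pe u : List (List (String × String))) :
    pvStepA (PySem.Dict.mk [("TRASH", t), ("PAPER", p), ("REVIEW", r), ("BILLING", b),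
      ("NOTICE", n), ("EXAM", ex), ("PERSONAL", pe), ("UNKNOWN", u)]) e =
    PySem.Dict.mk
      [("TRASH", if pvGetCatB e == "TRASH" then t ++ [e] else t),
       ("PAPER", if pvGetCatB e == "PAPER" then p ++ [e] else p),
       ("REVIEW", if pvGetCatB e == "REVIEW" then r ++ [e] else r),
       ("BILLING", if pvGetCatB e == "BILLING" then b ++ [e] else b),
       ("NOTICE", if pvGetCatB e == "NOTICE" then n ++ [e] else n),
       ("EXAM", if pvGetCatB e == "EXAM" then ex ++ [e] else ex),
       ("PERSONAL", if pvGetCatB e == "PERSONAL" then pe ++ [e] else pe),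
       ("UNKNOWN", if !(pvCats7.contains (pvGetCatB e)) then u ++ [e] else u)] := by
  have hc : pvGetCatA e = pvGetCatB e := pvGetCat_eq e
  by_cases h1 : pvGetCatB e = "TRASH" <;>
  by_cases h2 : pvGetCatB e = "PAPER" <;>
  by_cases h3 : pvGetCatB e = "REVIEW" <;>
  by_cases h4 : pvGetCatB e = "BILLING" <;>
  by_cases h5 : pvGetCatB e = "NOTICE" <;>
  by_cases h6 : pvGetCatB e = "EXAM" <;>
  by_cases h7 : pvGetCatB e = "PERSONAL" <;>
  by_cases h8 : pvGetCatB e = "UNKNOWN" <;>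
  first
    | simp [pvStepA, hc, PySem.Dict.contains, PySem.Dict.modify, PySem.Dict.insert,
        PySem.Dict.getD, PySem.Dict.get?, pvCats7, Ne.symm h1, Ne.symm h2, Ne.symm h3,
        Ne.symm h4, Ne.symm h5, Ne.symm h6, Ne.symm h7, Ne.symm h8, h1, h2, h3, h4, h5, h6, h7, h8]
    | simp_all [pvStepA, PySem.Dict.contains, PySem.Dict.modify, PySem.Dict.insert,
        PySem.Dict.getD, PySem.Dict.get?, pvCats7]

theorem append_if_filter (c : Bool) (t : List (List (String × String)))
    (e : List (String × String)) (F : List (List (String × String))) :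
    (if c then t ++ [e] else t) ++ F = t ++ (if c then e :: F else F) := by
  cases c <;> simp

theorem fold_invariant (emails : List (List (String × String)))
    (t p r b n ex pe u : List (List (String × String))) :
    (emails.foldl pvStepA
      (PySem.Dict.mk [("TRASH", t), ("PAPER", p), ("REVIEW", r), ("BILLING", b),
                      ("NOTICE", n), ("EXAM", ex), ("PERSONAL", pe), ("UNKNOWN", u)])).items =
    [("TRASH", t ++ emails.filter (fun e => pvGetCatB e == "TRASH")),
     ("PAPER", p ++ emails.filter (fun e => pvGetCatB e == "PAPER")),
     ("REVIEW", r ++ emails.filter (fun e => pvGetCatB e == "REVIEW")),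
     ("BILLING", b ++ emails.filter (fun e => pvGetCatB e == "BILLING")),
     ("NOTICE", n ++ emails.filter (fun e => pvGetCatB e == "NOTICE")),
     ("EXAM", ex ++ emails.filter (fun e => pvGetCatB e == "EXAM")),
     ("PERSONAL", pe ++ emails.filter (fun e => pvGetCatB e == "PERSONAL")),
     ("UNKNOWN", u ++ emails.filter (fun e => !(pvCats7.contains (pvGetCatB e))))] := by
  induction emails generalizing t p r b n ex pe u with
  | nil => simp
  | cons e es ih =>
    rw [List.foldl_cons, stepA_eq, ih]
    simp only [List.filter_cons, append_if_filter]

-- ===== VERDICT (by name: the statement is the Claim_ definition above) =====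
theorem group_emails_by_category_spec : Claim_equal_group_emails_by_category := by
  intro emails _
  unfold Spec_group_emails_by_category group_emails_by_category group_emails_by_category_alt
  simpa [pvCats7] using fold_invariant emails [] [] [] [] [] [] [] []
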